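-- pv_equiv track=rewrite | github.com/iliasmahboub/Phylomatic | backend/app/pipeline/assembly.py | _trim_by_quality
-- ===== SOURCE A (Python) =====
-- PHRED_CUTOFF = 20
--
-- def _trim_by_quality(
--     seq: str, quals: list[int], cutoff: int = PHRED_CUTOFF
-- ) -> tuple[str, list[int]]:
--     """Trim low-quality bases from both ends using a sliding-window PHRED cutoff."""
--     start = 0
--     end = len(seq)
--
--     for i in range(len(quals)):
--         if quals[i] >= cutoff:
--             start = i
--             break
--
--     for i in range(len(quals) - 1, -1, -1):
--         if quals[i] >= cutoff:
--             end = i + 1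
--             break
--
--     if start >= end:
--         return seq, quals
--
--     return seq[start:end], quals[start:end]
-- ===== SOURCE B (Python) =====
-- PHRED_CUTOFF = 20
--
-- def _trim_by_quality(seq, quals, cutoff=PHRED_CUTOFF):
--     """One forward pass records the first and last qualifying index at once."""
--     first = None
--     last = None
--     for i, q in enumerate(quals):
--         if q >= cutoff:
--             if first is None:
--                 first = i
--             last = i
--     if first is None:
--         start, end = 0, len(seq)
--     else:
--         start, end = first, last + 1
--     if start >= end:
--         return seq, quals
--     return seq[start:end], quals[start:end]
-- ===== Notes on version B (the rewrite author's own statement) =====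
-- stated objective: alternative
-- what changed: Replaces A's two separate end-scans with break (one forward over range(len), one backward over reversed range) by a single forward pass over enumerate(quals) that records both the first and the last qualifying index, then derives start/end from them.
import Mathlib
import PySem

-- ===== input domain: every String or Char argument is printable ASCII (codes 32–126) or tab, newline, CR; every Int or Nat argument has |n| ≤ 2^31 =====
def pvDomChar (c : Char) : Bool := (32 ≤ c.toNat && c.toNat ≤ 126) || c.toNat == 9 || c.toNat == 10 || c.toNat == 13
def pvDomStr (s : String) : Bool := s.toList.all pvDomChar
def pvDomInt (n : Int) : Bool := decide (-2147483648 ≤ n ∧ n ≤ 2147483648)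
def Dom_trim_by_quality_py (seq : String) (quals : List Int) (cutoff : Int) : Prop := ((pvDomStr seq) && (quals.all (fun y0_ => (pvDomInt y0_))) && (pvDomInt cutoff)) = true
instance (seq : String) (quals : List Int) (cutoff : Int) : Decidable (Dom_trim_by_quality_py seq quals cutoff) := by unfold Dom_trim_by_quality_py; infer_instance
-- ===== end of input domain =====

-- B replaces A's two end-scans (each with a break) by one forward pass recording
-- the first and last qualifying index; same cost, plainer control flow (objective: alternative).

-- ===== PORT A =====
-- forward scan with break: `for i in range(len(quals)): if quals[i] >= cutoff: start = i; break`
def pvAFwd (cutoff : Int) (l : List Int) (i : Int) (start : Int) : Int :=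
  match l with
  | [] => start
  | q :: rest => if cutoff ≤ q then i else pvAFwd cutoff rest (i + 1) start

-- backward scan with break over range(len(quals)-1, -1, -1): scans quals.reverse with i descending
def pvABwd (cutoff : Int) (l : List Int) (i : Int) (e : Int) : Int :=
  match l with
  | [] => e
  | q :: rest => if cutoff ≤ q then i + 1 else pvABwd cutoff rest (i - 1) e

def trim_by_quality_py (seq : String) (quals : List Int) (cutoff : Int) : String × List Int :=
  let start := pvAFwd cutoff quals 0 0
  let end_ := pvABwd cutoff quals.reverse ((quals.length : Int) - 1) (PySem.Str.len seq)
  if start ≥ end_ then (seq, quals)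
  else (PySem.Str.slice seq (some start) (some end_), PySem.List.slice quals (some start) (some end_))

-- ===== PORT B =====
-- single pass: `for i, q in enumerate(quals): if q >= cutoff: (first ??= i); last = i`
def pvBLoop (cutoff : Int) (l : List Int) (i : Int) (fl : Option Int × Option Int) :
    Option Int × Option Int :=
  match l with
  | [] => fl
  | q :: rest =>
      pvBLoop cutoff rest (i + 1)
        (if cutoff ≤ q then (if fl.1 = none then some i else fl.1, some i) else fl)

def trim_by_quality_py_alt (seq : String) (quals : List Int) (cutoff : Int) : String × List Int :=
  let fl := pvBLoop cutoff quals 0 (none, none)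
  let se : Int × Int :=
    match fl.1, fl.2 with
    | some f, some l => (f, l + 1)
    | _, _ => (0, PySem.Str.len seq)
  if se.1 ≥ se.2 then (seq, quals)
  else (PySem.Str.slice seq (some se.1) (some se.2), PySem.List.slice quals (some se.1) (some se.2))

-- ===== PRECONDITION & SPEC =====
def Spec_trim_by_quality_py (seq : String) (quals : List Int) (cutoff : Int) (out : String × List Int) : Prop := out = trim_by_quality_py_alt seq quals cutoff
instance (seq : String) (quals : List Int) (cutoff : Int) (out : String × List Int) : Decidable (Spec_trim_by_quality_py seq quals cutoff out) := by unfold Spec_trim_by_quality_py; infer_instance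

-- ===== CLAIM (what is proved, stated in full; the proofs are below) =====
def Claim_equal_trim_by_quality_py : Prop := ∀ (seq : String) (quals : List Int) (cutoff : Int), Dom_trim_by_quality_py seq quals cutoff → Spec_trim_by_quality_py seq quals cutoff (trim_by_quality_py seq quals cutoff)

-- ===== LEMMAS AND PROOFS =====

-- first qualifying index, if any
def pvFirst? (cutoff : Int) : List Int → Option Nat
  | [] => none
  | q :: rest => if cutoff ≤ q then some 0 else (pvFirst? cutoff rest).map (· + 1)

-- last qualifying index, if any
def pvLast? (cutoff : Int) : List Int → Option Nat
  | [] => none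
  | q :: rest =>
      match pvLast? cutoff rest with
      | some j => some (j + 1)
      | none => if cutoff ≤ q then some 0 else none

theorem pvAFwd_spec (cutoff : Int) (l : List Int) (i s : Int) :
    pvAFwd cutoff l i s =
      match pvFirst? cutoff l with
      | some j => i + (j : Int)
      | none => s := by
  induction l generalizing i with
  | nil => simp [pvAFwd, pvFirst?]
  | cons q rest ih =>
      by_cases h : cutoff ≤ q
      · simp [pvAFwd, pvFirst?, h]
      · simp only [pvAFwd, pvFirst?, if_neg h, ih]
        cases hf : pvFirst? cutoff rest
        · simp
        · simp only [Option.map_some]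
          push_cast
          ring

theorem pvABwd_append (cutoff : Int) (xs ys : List Int) (i e : Int) :
    pvABwd cutoff (xs ++ ys) i e =
      pvABwd cutoff xs i (pvABwd cutoff ys (i - (xs.length : Int)) e) := by
  induction xs generalizing i with
  | nil => simp [pvABwd]
  | cons q rest ih =>
      by_cases h : cutoff ≤ q
      · simp [pvABwd, h]
      · simp only [List.cons_append, pvABwd, if_neg h, ih, List.length_cons]
        congr 2
        push_cast
        ring

theorem pvABwd_rev_spec (cutoff : Int) (l : List Int) (i e : Int) :
    pvABwd cutoff l.reverse i e =
      match pvLast? cutoff l with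
      | some j => i - ((l.length : Int) - 1 - (j : Int)) + 1
      | none => e := by
  induction l generalizing i e with
  | nil => simp [pvABwd, pvLast?]
  | cons q rest ih =>
      rw [List.reverse_cons, pvABwd_append, ih]
      cases hl : pvLast? cutoff rest with
      | some j =>
          simp only [pvLast?, hl, List.length_cons]
          push_cast
          ring
      | none =>
          by_cases h : cutoff ≤ q
          · simp only [pvLast?, hl, if_pos h, pvABwd, List.length_reverse, List.length_cons]
            push_cast
            ring
          · simp [pvLast?, hl, h, pvABwd]

theorem pvBLoop_spec (cutoff : Int) (l : List Int) (i : Int) (f0 l0 : Option Int) :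
    pvBLoop cutoff l i (f0, l0) =
      ((match f0 with
        | some x => some x
        | none => (pvFirst? cutoff l).map (fun j => i + (j : Int))),
       (match pvLast? cutoff l with
        | some j => some (i + (j : Int))
        | none => l0)) := by
  induction l generalizing i f0 l0 with
  | nil =>
      simp only [pvBLoop, pvFirst?, pvLast?]
      cases f0 <;> rfl
  | cons q rest ih =>
      by_cases h : cutoff ≤ q
      · simp only [pvBLoop, if_pos h]
        cases f0 with
        | none =>
            simp only [ih, Prod.mk.injEq]
            refine ⟨by simp [pvFirst?, h], ?_⟩
            cases hl : pvLast? cutoff rest <;>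
              · simp only [pvLast?, hl, h]
                push_cast
                ring_nf
        | some x =>
            simp only [ih, Prod.mk.injEq]
            refine ⟨by simp, ?_⟩
            cases hl : pvLast? cutoff rest <;>
              · simp only [pvLast?, hl, h]
                push_cast
                ring_nf
      · simp only [pvBLoop, if_neg h, ih, Prod.mk.injEq]
        constructor
        · cases f0 with
          | some x => rfl
          | none =>
              simp only [pvFirst?, if_neg h]
              cases hf : pvFirst? cutoff rest
              · simp
              · simp
                all_goals omega
        · simp only [pvLast?]
          cases hl : pvLast? cutoff rest with
          | none => simp [h]
          | some j =>
              push_cast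
              ring_nf

theorem pvFirst?_none_iff (cutoff : Int) (l : List Int) :
    pvFirst? cutoff l = none ↔ pvLast? cutoff l = none := by
  induction l with
  | nil => simp [pvFirst?, pvLast?]
  | cons q rest ih =>
      by_cases h : cutoff ≤ q
      · simp only [pvFirst?, pvLast?, if_pos h]
        cases hl : pvLast? cutoff rest <;> simp
      · simp only [pvFirst?, pvLast?, if_neg h]
        cases hl : pvLast? cutoff rest <;>
          simp [Option.map_eq_none_iff, ih, hl]

-- ===== VERDICT (by name: the statement is the Claim_ definition above) =====
theorem trim_by_quality_py_spec : Claim_equal_trim_by_quality_py := by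
  intro seq quals cutoff _
  unfold Spec_trim_by_quality_py trim_by_quality_py trim_by_quality_py_alt
  rw [pvAFwd_spec, pvABwd_rev_spec, pvBLoop_spec]
  have hiff := pvFirst?_none_iff cutoff quals
  cases hf : pvFirst? cutoff quals with
  | none =>
      have hl : pvLast? cutoff quals = none := hiff.mp hf
      simp [hl]
  | some j =>
      cases hl : pvLast? cutoff quals with
      | none =>
          rw [hl] at hiff
          simp [hiff.mpr rfl] at hf
      | some k =>
          simp
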